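-- pv_equiv track=rewrite | github.com/grrrml/generated_segmentation | models/text_parser.py | _filter_excluded_entities
-- ===== SOURCE A (Python) =====
-- from typing import List, Optional
--
-- def _filter_excluded_entities(entities: List[str]) -> List[str]:
--     """
--     Filter out non-physical/abstract entities that shouldn't be segmented.
--
--     Args:
--         entities: List of entity names
--
--     Returns:
--         Filtered list without excluded terms
--     """
--     # Exact-match excluded terms - these must match the whole entity exactly
--     excluded_exact = {
--         # Lighting (not segmentable)
--         "realistic shadows", "shadows", "shadow",
--         "natural light", "light", "lighting", "sunlight",
--         "ambient light", "overhead light", "soft light", "warm light",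
--         "dramatic lighting", "rim light", "backlight",
--         # Structural/environmental elements (not distinct objects)
--         # "wall", "walls", "ceiling", "floor", "ground", "road",
--         # "sky", "room", "space", "air", "pavement", "sidewalk",
--         # Abstract/style terms
--         "atmosphere", "mood", "style", "aesthetic", "vibe", "tone",
--         # Non-physical descriptions
--         "reflection", "reflections", "bokeh", "depth of field",
--         "blur", "contrast", "saturation", "hdr",
--         # Scene descriptors (not objects)
--         "scene", "setting", "environment", "background", "foreground",
--         "composition", "view", "angle", "perspective",
--         # Quality descriptors
--         "detail", "details", "texture", "textures", "quality",
--         "resolution", "realistic", "photorealistic", "hyperrealistic",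
--     }
--
--     # Color words that can appear in valid object descriptions (e.g., "light brown cabinet")
--     color_modifiers = {"light", "dark", "bright", "pale", "deep"}
--
--     filtered = []
--     for entity in entities:
--         entity_lower = entity.lower().strip()
--
--         # Check exact match first
--         if entity_lower in excluded_exact:
--             continue
--
--         # Check if entity starts with excluded term (but not color modifiers)
--         is_excluded = False
--         for term in excluded_exact:
--             if entity_lower.startswith(term + " "):
--                 # Check if this is actually a color modifier usage (e.g., "light brown")
--                 # If the word after the term is a color or object word, don't exclude
--                 first_word = entity_lower.split()[0] if entity_lower.split() else ""
--                 if first_word in color_modifiers: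
--                     # This is likely a color description like "light brown cabinet"
--                     continue
--                 is_excluded = True
--                 break
--
--         if not is_excluded:
--             filtered.append(entity)
--
--     return filtered
-- ===== SOURCE B (Python) =====
-- from typing import List, Optional
--
-- # Same excluded/color vocabularies as the original.
-- _EXCLUDED = frozenset({
--     "realistic shadows", "shadows", "shadow",
--     "natural light", "light", "lighting", "sunlight",
--     "ambient light", "overhead light", "soft light", "warm light",
--     "dramatic lighting", "rim light", "backlight",
--     "atmosphere", "mood", "style", "aesthetic", "vibe", "tone",
--     "reflection", "reflections", "bokeh", "depth of field",
--     "blur", "contrast", "saturation", "hdr",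
--     "scene", "setting", "environment", "background", "foreground",
--     "composition", "view", "angle", "perspective",
--     "detail", "details", "texture", "textures", "quality",
--     "resolution", "realistic", "photorealistic", "hyperrealistic",
-- })
--
-- _COLORS = frozenset({"light", "dark", "bright", "pale", "deep"})
--
-- def _filter_excluded_entities(entities: List[str]) -> List[str]:
--     """Filter out non-physical/abstract entities that shouldn't be segmented.
--
--     Instead of scanning every excluded term for a prefix match, collect the
--     entity's prefixes ending at its first (up to 3) spaces and test those
--     against the excluded set (no excluded term has more than 2 spaces).
--     """
--     filtered = []
--     for entity in entities:
--         e = entity.lower().strip()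
--         if e in _EXCLUDED:
--             continue
--         prefixes = []
--         acc = []
--         for ch in e:
--             if ch == ' ':
--                 prefixes.append(''.join(acc))
--                 if len(prefixes) == 3:
--                     break
--             acc.append(ch)
--         if prefixes and prefixes[0] not in _COLORS and any(p in _EXCLUDED for p in prefixes):
--             continue
--         filtered.append(entity)
--     return filtered
-- ===== Notes on version B (the rewrite author's own statement) =====
-- stated objective: faster
-- what changed: Instead of testing every one of the 46 excluded terms as a prefix of each entity, B collects the entity's prefixes ending at its first up-to-3 spaces (no excluded term has more than 2 internal spaces) and tests only those against the excluded set.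
import Mathlib
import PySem

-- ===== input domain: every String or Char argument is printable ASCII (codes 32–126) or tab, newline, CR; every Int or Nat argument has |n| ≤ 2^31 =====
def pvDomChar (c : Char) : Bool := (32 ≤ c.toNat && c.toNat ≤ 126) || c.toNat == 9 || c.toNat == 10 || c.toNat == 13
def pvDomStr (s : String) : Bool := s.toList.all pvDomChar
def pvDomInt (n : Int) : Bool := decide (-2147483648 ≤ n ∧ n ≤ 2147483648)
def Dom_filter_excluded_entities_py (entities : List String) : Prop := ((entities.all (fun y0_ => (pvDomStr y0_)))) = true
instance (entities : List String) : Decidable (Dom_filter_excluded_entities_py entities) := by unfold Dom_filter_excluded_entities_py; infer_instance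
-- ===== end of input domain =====

-- B replaces A's scan of all 46 excluded terms per entity by testing the entity's
-- prefixes ending at its first (up to 3) spaces against the excluded set.

-- shared vocabulary (the literal sets from the Python source)
def excludedTerms : List String :=
  ["realistic shadows", "shadows", "shadow",
   "natural light", "light", "lighting", "sunlight",
   "ambient light", "overhead light", "soft light", "warm light",
   "dramatic lighting", "rim light", "backlight",
   "atmosphere", "mood", "style", "aesthetic", "vibe", "tone",
   "reflection", "reflections", "bokeh", "depth of field",
   "blur", "contrast", "saturation", "hdr",
   "scene", "setting", "environment", "background", "foreground",
   "composition", "view", "angle", "perspective",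
   "detail", "details", "texture", "textures", "quality",
   "resolution", "realistic", "photorealistic", "hyperrealistic"]

def excludedList : List (List Char) := excludedTerms.map String.toList

def excludedSet : PySem.Set (List Char) := PySem.Set.ofList excludedList

def colorsSet : PySem.Set (List Char) :=
  PySem.Set.ofList ((["light", "dark", "bright", "pale", "deep"] : List String).map String.toList)

-- ===== PORT A =====
-- inner `for term in excluded_exact: …` loop of A (returning true = `break` with is_excluded)
def exA (e : List Char) : List (List Char) → Bool
  | [] => false
  | t :: rest =>
    if PySem.Chars.startswith e (t ++ [' ']) then
      let ws := PySem.Chars.split₀ e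
      let first_word := match ws with | [] => ([] : List Char) | w :: _ => w
      if first_word ∈ colorsSet then exA e rest else true
    else exA e rest

def loopA : List String → List String → List String
  | [], filtered => filtered
  | entity :: rest, filtered =>
    let e := PySem.Chars.strip (PySem.Chars.lower entity.toList)
    if e ∈ excludedSet then loopA rest filtered
    else if exA e excludedList then loopA rest filtered
    else loopA rest (filtered ++ [entity])

def filter_excluded_entities_py (entities : List String) : List String :=
  loopA entities []

-- ===== PORT B =====
-- `for ch in e: …` prefix-collecting loop of Source B (prefixes/acc accumulators, breaks at 3)
def pfxB : List Char → List (List Char) → List Char → List (List Char)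
  | [], prefixes, _ => prefixes
  | c :: rest, prefixes, acc =>
    if c = ' ' then
      let prefixes' := prefixes ++ [acc]
      if prefixes'.length = 3 then prefixes'
      else pfxB rest prefixes' (acc ++ [c])
    else pfxB rest prefixes (acc ++ [c])

def loopB : List String → List String → List String
  | [], filtered => filtered
  | entity :: rest, filtered =>
    let e := PySem.Chars.strip (PySem.Chars.lower entity.toList)
    if e ∈ excludedSet then loopB rest filtered
    else
      match pfxB e [] [] with
      | [] => loopB rest (filtered ++ [entity])
      | p0 :: ps =>
        if !(decide (p0 ∈ colorsSet)) && (p0 :: ps).any (fun p => decide (p ∈ excludedSet)) then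
          loopB rest filtered
        else loopB rest (filtered ++ [entity])

def filter_excluded_entities_py_alt (entities : List String) : List String :=
  loopB entities []

-- ===== PRECONDITION & SPEC =====
def Spec_filter_excluded_entities_py (entities : List String) (out : List String) : Prop := out = filter_excluded_entities_py_alt entities
instance (entities : List String) (out : List String) : Decidable (Spec_filter_excluded_entities_py entities out) := by unfold Spec_filter_excluded_entities_py; infer_instance

-- ===== CLAIM (what is proved, stated in full; the proofs are below) =====
def Claim_equal_filter_excluded_entities_py : Prop := ∀ (entities : List String), Dom_filter_excluded_entities_py entities → Spec_filter_excluded_entities_py entities (filter_excluded_entities_py entities)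

-- ===== LEMMAS AND PROOFS =====

-- mathematical description of pfxB's result: the prefixes of s ending just before
-- each of its first k spaces
def gPfx : Nat → List Char → List (List Char)
  | 0, _ => []
  | _ + 1, [] => []
  | k + 1, c :: r =>
    if c = ' ' then [] :: (gPfx k r).map (fun u => ' ' :: u)
    else (gPfx (k + 1) r).map (fun u => c :: u)

theorem gPfx_nil (k : Nat) : gPfx k [] = [] := by cases k <;> rfl

theorem gPfx_zero (s : List Char) : gPfx 0 s = [] := by cases s <;> rfl

theorem gPfx_succ_cons (k : Nat) (c : Char) (r : List Char) :
    gPfx (k + 1) (c :: r) =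
      if c = ' ' then [] :: (gPfx k r).map (fun u => ' ' :: u)
      else (gPfx (k + 1) r).map (fun u => c :: u) := rfl

theorem mem_gPfx (s : List Char) : ∀ (k : Nat) (t : List Char),
    t ∈ gPfx k s ↔ (t ++ [' ']) <+: s ∧ t.count ' ' < k := by
  induction s with
  | nil => intro k t; simp [gPfx_nil]
  | cons c r ih =>
    intro k t
    cases k with
    | zero => simp [gPfx]
    | succ k =>
      by_cases hc : c = ' '
      · subst hc
        cases t with
        | nil =>
          rw [gPfx_succ_cons, if_pos rfl]
          simp [List.cons_prefix_cons]
        | cons a t' =>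
          rw [gPfx_succ_cons, if_pos rfl]
          simp only [List.mem_cons, List.mem_map, ih,
            List.cons_append, List.cons_prefix_cons, List.count_cons]
          constructor
          · rintro (h | ⟨u, ⟨hp, hcnt⟩, h1⟩)
            · exact absurd h (by simp)
            · obtain ⟨rfl, rfl⟩ := List.cons_eq_cons.mp h1
              refine ⟨⟨rfl, hp⟩, ?_⟩
              simp; omega
          · rintro ⟨⟨rfl, hp⟩, hcnt⟩
            right
            refine ⟨t', ⟨hp, ?_⟩, rfl⟩
            simp at hcnt; omega
      · cases t with
        | nil =>
          rw [gPfx_succ_cons, if_neg hc]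
          simp only [List.mem_map, List.nil_append, List.cons_prefix_cons]
          constructor
          · rintro ⟨u, _, h⟩; exact absurd h (by simp)
          · rintro ⟨⟨h, _⟩, _⟩; exact absurd h.symm hc
        | cons a t' =>
          rw [gPfx_succ_cons, if_neg hc]
          simp only [List.mem_map, ih,
            List.cons_append, List.cons_prefix_cons, List.count_cons]
          constructor
          · rintro ⟨u, ⟨hp, hcnt⟩, h1⟩
            obtain ⟨rfl, rfl⟩ := List.cons_eq_cons.mp h1
            refine ⟨⟨rfl, hp⟩, ?_⟩
            simp [hc]; omega
          · rintro ⟨⟨rfl, hp⟩, hcnt⟩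
            refine ⟨t', ⟨hp, ?_⟩, rfl⟩
            simp [hc] at hcnt; omega

theorem pfxB_eq_gPfx (s : List Char) : ∀ (prefixes : List (List Char)) (acc : List Char),
    prefixes.length < 3 →
    pfxB s prefixes acc = prefixes ++ (gPfx (3 - prefixes.length) s).map (fun u => acc ++ u) := by
  induction s with
  | nil => intro p a _; simp [pfxB, gPfx_nil]
  | cons c rest ih =>
    intro p a hlen
    by_cases hc : c = ' '
    · subst hc
      obtain ⟨m, hm⟩ : ∃ m, 3 - p.length = m + 1 := ⟨2 - p.length, by omega⟩
      rw [show pfxB (' ' :: rest) p a =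
            (if (p ++ [a]).length = 3 then p ++ [a]
             else pfxB rest (p ++ [a]) (a ++ [' '])) from rfl]
      by_cases h3 : (p ++ [a]).length = 3
      · have : p.length = 2 := by simp at h3; omega
        rw [if_pos h3, hm, gPfx_succ_cons, if_pos rfl]
        have hm0 : m = 0 := by omega
        subst hm0
        simp [gPfx_zero]
      · rw [if_neg h3]
        have hlen' : (p ++ [a]).length < 3 := by simp at h3 ⊢; omega
        rw [ih (p ++ [a]) (a ++ [' ']) hlen']
        rw [hm, gPfx_succ_cons, if_pos rfl]
        have : 3 - (p ++ [a]).length = m := by simp at hm ⊢; omega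
        rw [this]
        simp [List.map_map, Function.comp_def]
    · rw [show pfxB (c :: rest) p a = pfxB rest p (a ++ [c]) from by simp [pfxB, hc]]
      rw [ih p (a ++ [c]) hlen]
      obtain ⟨m, hm⟩ : ∃ m, 3 - p.length = m + 1 := ⟨2 - p.length, by omega⟩
      rw [hm, gPfx_succ_cons, if_neg hc, ← hm]
      simp [List.map_map, Function.comp_def]

theorem pfxB_spec (s : List Char) : pfxB s [] [] = gPfx 3 s := by
  simpa using pfxB_eq_gPfx s [] [] (by norm_num)

theorem gPfx_head (r : List Char) : ∀ (w : List Char) (k : Nat), w.count ' ' = 0 →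
    ∃ l, gPfx (k + 1) (w ++ ' ' :: r) = w :: l := by
  intro w
  induction w with
  | nil =>
    intro k _
    exact ⟨(gPfx k r).map (fun u => ' ' :: u), by rw [List.nil_append, gPfx_succ_cons, if_pos rfl]⟩
  | cons c w' ihw =>
    intro k hcnt
    have hc : c ≠ ' ' := by
      intro h; subst h; simp at hcnt
    have hcnt' : w'.count ' ' = 0 := by simp [hc] at hcnt ⊢; omega
    obtain ⟨l', hl'⟩ := ihw k hcnt'
    refine ⟨l'.map (fun u => c :: u), ?_⟩
    rw [List.cons_append, gPfx_succ_cons, if_neg hc, hl']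
    simp

theorem go_nonws (w : List Char) (hw : ∀ c ∈ w, PySem.Chars.isspace c = false) :
    ∀ (rest cur : List Char) (acc : List (List Char)),
    PySem.Chars.split₀.go (w ++ rest) cur acc = PySem.Chars.split₀.go rest (w.reverse ++ cur) acc := by
  induction w with
  | nil => intro rest cur acc; simp
  | cons c w' ih =>
    intro rest cur acc
    have hc : PySem.Chars.isspace c = false := hw c (by simp)
    rw [List.cons_append, show PySem.Chars.split₀.go (c :: (w' ++ rest)) cur acc =
        PySem.Chars.split₀.go (w' ++ rest) (c :: cur) acc from by simp [PySem.Chars.split₀.go, hc]]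
    rw [ih (fun d hd => hw d (by simp [hd])) rest (c :: cur) acc]
    simp

theorem go_acc (r : List Char) : ∀ (cur : List Char) (acc : List (List Char)),
    ∃ tail, PySem.Chars.split₀.go r cur acc = acc.reverse ++ tail := by
  induction r with
  | nil =>
    intro cur acc
    by_cases h : cur.isEmpty
    · exact ⟨[], by simp [PySem.Chars.split₀.go, h]⟩
    · exact ⟨[cur.reverse], by simp [PySem.Chars.split₀.go, h]⟩
  | cons c r' ih =>
    intro cur acc
    by_cases hs : PySem.Chars.isspace c
    · by_cases h : cur.isEmpty
      · obtain ⟨t, ht⟩ := ih [] acc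
        exact ⟨t, by simp [PySem.Chars.split₀.go, hs, h, ht]⟩
      · obtain ⟨t, ht⟩ := ih [] (cur.reverse :: acc)
        refine ⟨cur.reverse :: t, ?_⟩
        simp only [PySem.Chars.split₀.go, hs, h, ht]
        simp
    · obtain ⟨t, ht⟩ := ih (c :: cur) acc
      exact ⟨t, by simp [PySem.Chars.split₀.go, hs, ht]⟩

theorem split₀_head (w : List Char) (c : Char) (r : List Char)
    (hne : w ≠ []) (hw : ∀ ch ∈ w, PySem.Chars.isspace ch = false)
    (hc : PySem.Chars.isspace c = true) :
    ∃ l, PySem.Chars.split₀ (w ++ c :: r) = w :: l := by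
  have h1 : PySem.Chars.split₀ (w ++ c :: r) = PySem.Chars.split₀.go (c :: r) w.reverse [] := by
    rw [show PySem.Chars.split₀ (w ++ c :: r) = PySem.Chars.split₀.go (w ++ c :: r) [] [] from rfl]
    simpa using go_nonws w hw (c :: r) [] []
  have hne' : w.reverse.isEmpty = false := by
    cases w with | nil => exact absurd rfl hne | cons a l => simp
  have h2 : PySem.Chars.split₀.go (c :: r) w.reverse [] =
      PySem.Chars.split₀.go r [] [w.reverse.reverse] := by
    simp [PySem.Chars.split₀.go, hc, hne']
  obtain ⟨t, ht⟩ := go_acc r [] [w.reverse.reverse]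
  refine ⟨t, ?_⟩
  rw [h1, h2, ht]
  simp

-- the first word exactly as A computes it
def fwA (e : List Char) : List Char :=
  match PySem.Chars.split₀ e with | [] => ([] : List Char) | w :: _ => w

theorem exA_any (e : List Char) (ts : List (List Char)) :
    exA e ts = ts.any (fun t => PySem.Chars.startswith e (t ++ [' ']) && !(decide (fwA e ∈ colorsSet))) := by
  induction ts with
  | nil => rfl
  | cons t rest ih =>
    show (if PySem.Chars.startswith e (t ++ [' ']) then
            (if fwA e ∈ colorsSet then exA e rest else true)
          else exA e rest) = _
    by_cases h : PySem.Chars.startswith e (t ++ [' '])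
    · by_cases hc : fwA e ∈ colorsSet
      · simp [h, hc, ih]
      · simp [h, hc]
    · simp [h, ih]

set_option maxRecDepth 4000 in
theorem term_facts_bool : (excludedList.all (fun t =>
    decide (t.count ' ' ≤ 2) && !(t.takeWhile (fun c => c ≠ ' ')).isEmpty &&
    (t.takeWhile (fun c => c ≠ ' ')).all (fun c => !PySem.Chars.isspace c))) = true := by decide

theorem term_facts : ∀ t ∈ excludedList,
    t.count ' ' ≤ 2 ∧ (t.takeWhile (fun c => c ≠ ' ')) ≠ [] ∧
    (∀ c ∈ t.takeWhile (fun c => c ≠ ' '), PySem.Chars.isspace c = false) := by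
  intro t ht
  have h := List.all_eq_true.mp term_facts_bool t ht
  simp only [Bool.and_eq_true, decide_eq_true_eq, List.all_eq_true] at h
  obtain ⟨⟨h1, h2⟩, h3⟩ := h
  refine ⟨h1, ?_, fun c hc => by simpa using h3 c hc⟩
  simpa using h2

theorem decomp (t e : List Char) (h1 : (t ++ [' ']) <+: e) :
    ∃ r, e = (t.takeWhile (fun c => c ≠ ' ')) ++ ' ' :: r := by
  obtain ⟨r0, rfl⟩ := h1
  have htw : (t.takeWhile (fun c => c ≠ ' ')) ++ t.dropWhile (fun c => c ≠ ' ') = t :=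
    List.takeWhile_append_dropWhile
  cases hd : t.dropWhile (fun c => c ≠ ' ') with
  | nil =>
    refine ⟨r0, ?_⟩
    conv_lhs => rw [← htw, hd]
    simp
  | cons c d' =>
    have hc : c = ' ' := by
      have := List.head?_dropWhile_not (p := fun c => decide (c ≠ ' ')) t
      rw [hd] at this
      simpa using this
    subst hc
    refine ⟨d' ++ ' ' :: r0, ?_⟩
    conv_lhs => rw [← htw, hd]
    simp

theorem mem_excludedSet (t : List Char) : t ∈ excludedSet ↔ t ∈ excludedList :=
  PySem.Set.mem_ofList excludedList t

-- per-entity equivalence of the two exclusion tests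
theorem step (e : List Char) :
    exA e excludedList = (match pfxB e [] [] with
      | [] => false
      | p0 :: ps => !(decide (p0 ∈ colorsSet)) && (p0 :: ps).any (fun p => decide (p ∈ excludedSet))) := by
  rw [pfxB_spec, exA_any]
  by_cases hex : ∃ t ∈ excludedList, (t ++ [' ']) <+: e
  · obtain ⟨t, htL, hpref⟩ := hex
    obtain ⟨hcnt, hne, hnws⟩ := term_facts t htL
    obtain ⟨r, herw⟩ := decomp t e hpref
    have hwcnt : (t.takeWhile (fun c => c ≠ ' ')).count ' ' = 0 := by
      rw [List.count_eq_zero]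
      intro hmem
      have := List.mem_takeWhile_imp hmem
      simp at this
    obtain ⟨l, hsplit⟩ := split₀_head (t.takeWhile (fun c => c ≠ ' ')) ' ' r hne hnws (by decide)
    have hfw : fwA e = t.takeWhile (fun c => c ≠ ' ') := by
      rw [fwA, herw, hsplit]
    obtain ⟨l2, hg⟩ := gPfx_head r (t.takeWhile (fun c => c ≠ ' ')) 2 hwcnt
    have hg' : gPfx 3 e = (t.takeWhile (fun c => c ≠ ' ')) :: l2 := by rw [herw]; exact hg
    rw [hg']
    show _ = (!(decide ((t.takeWhile (fun c => c ≠ ' ')) ∈ colorsSet)) &&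
        ((t.takeWhile (fun c => c ≠ ' ')) :: l2).any (fun p => decide (p ∈ excludedSet)))
    have hBany : (((t.takeWhile (fun c => c ≠ ' ')) :: l2).any (fun p => decide (p ∈ excludedSet))) = true := by
      apply List.any_eq_true.2
      refine ⟨t, ?_, by simp [mem_excludedSet, htL]⟩
      rw [← hg', mem_gPfx]
      exact ⟨hpref, by omega⟩
    rw [hBany, Bool.and_true, ← hfw]
    by_cases hcol : fwA e ∈ colorsSet
    · simp [hcol]
    · simp only [hcol, decide_false, Bool.not_false, Bool.and_true]
      apply List.any_eq_true.2
      refine ⟨t, htL, ?_⟩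
      rw [PySem.Chars.startswith_iff]
      exact hpref
  · push Not at hex
    have hA : (excludedList.any fun t => PySem.Chars.startswith e (t ++ [' ']) && !(decide (fwA e ∈ colorsSet))) = false := by
      rw [List.any_eq_false]
      intro t ht
      have : PySem.Chars.startswith e (t ++ [' ']) = false := by
        rw [← Bool.not_eq_true, PySem.Chars.startswith_iff]
        exact hex t ht
      simp [this]
    rw [hA]
    cases hg : gPfx 3 e with
    | nil => rfl
    | cons p0 ps =>
      show false = (!(decide (p0 ∈ colorsSet)) && ((p0 :: ps).any (fun p => decide (p ∈ excludedSet))))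
      have hBany : ((p0 :: ps).any (fun p => decide (p ∈ excludedSet))) = false := by
        rw [List.any_eq_false]
        intro p hp
        have hpg : p ∈ gPfx 3 e := by rw [hg]; exact hp
        rw [mem_gPfx] at hpg
        simp only [mem_excludedSet]
        intro hpL
        exact hex p (of_decide_eq_true hpL) hpg.1
      rw [hBany, Bool.and_false]

theorem loops_eq : ∀ (l acc : List String), loopA l acc = loopB l acc := by
  intro l
  induction l with
  | nil => intro acc; rfl
  | cons entity rest ih =>
    intro acc
    show loopA (entity :: rest) acc = loopB (entity :: rest) acc
    simp only [loopA, loopB]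
    by_cases hS : PySem.Chars.strip (PySem.Chars.lower entity.toList) ∈ excludedSet
    · simp [hS, ih]
    · simp only [if_neg hS]
      rw [step (PySem.Chars.strip (PySem.Chars.lower entity.toList))]
      cases hp : pfxB (PySem.Chars.strip (PySem.Chars.lower entity.toList)) [] [] with
      | nil => simp [ih]
      | cons p0 ps =>
        by_cases hb : (!(decide (p0 ∈ colorsSet)) && (p0 :: ps).any (fun p => decide (p ∈ excludedSet))) = true
        · simp [ih]
        · simp only [Bool.not_eq_true] at hb
          simp [ih]

-- ===== VERDICT (by name: the statement is the Claim_ definition above) =====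
theorem filter_excluded_entities_py_spec : Claim_equal_filter_excluded_entities_py := by
  intro entities _
  show filter_excluded_entities_py entities = filter_excluded_entities_py_alt entities
  unfold filter_excluded_entities_py filter_excluded_entities_py_alt
  exact loops_eq entities []
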